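-- pv_equiv track=rewrite | github.com/Denniels/consola_windows | streamlit_app/utils/command_parser.py | detect_console_type
-- ===== SOURCE A (Python) =====
-- def detect_console_type(command: str) -> str:
--     """Detecta si el comando es CMD o PowerShell"""
--     command = command.strip().lower()
--
--     # Verificar comandos específicos de PowerShell
--     ps_indicators = [
--         'get-', 'set-', 'new-', 'remove-', 'start-', 'stop-',
--         'test-', 'invoke-', 'import-', 'export-', 'select-',
--         'where-', 'foreach-', 'measure-', 'sort-', 'group-'
--     ]
--
--     if any(command.startswith(indicator) for indicator in ps_indicators):
--         return "powershell"
--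
--     # Verificar sintaxis de PowerShell
--     if '-' in command and not command.startswith('cd '):
--         return "powershell"
--
--     # Por defecto, asumir CMD
--     return "cmd"
-- ===== SOURCE B (Python) =====
-- def detect_console_type(command: str) -> str:
--     """Detecta si el comando es CMD o PowerShell"""
--     command = command.strip().lower()
--     # Every PowerShell indicator prefix contains '-' and none starts with 'cd ',
--     # so the single dash test subsumes the indicator scan.
--     return "powershell" if '-' in command and not command.startswith('cd ') else "cmd"
-- ===== Notes on version B (the rewrite author's own statement) =====
-- stated objective: simpler
-- what changed: Dropped the 16-element indicator list and its prefix scan entirely: since every indicator contains '-' and none starts with 'cd ', the later dash test already subsumes it, leaving a single boolean expression.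
import Mathlib
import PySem

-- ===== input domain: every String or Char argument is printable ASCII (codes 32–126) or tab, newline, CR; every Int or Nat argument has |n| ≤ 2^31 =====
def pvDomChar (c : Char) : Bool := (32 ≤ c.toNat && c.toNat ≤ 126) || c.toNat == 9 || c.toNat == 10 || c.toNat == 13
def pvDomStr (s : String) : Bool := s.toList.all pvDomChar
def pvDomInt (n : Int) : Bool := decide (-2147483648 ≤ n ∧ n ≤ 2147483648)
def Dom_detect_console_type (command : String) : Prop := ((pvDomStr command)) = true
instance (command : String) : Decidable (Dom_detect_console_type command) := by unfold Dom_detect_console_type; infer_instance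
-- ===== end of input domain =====

-- B drops A's redundant 16-prefix PowerShell-indicator scan (each indicator contains '-'
-- and none starts with "cd ", so the dash test subsumes it), leaving one boolean test.


-- ===== PORT A =====
def psIndicators : List String :=
  ["get-", "set-", "new-", "remove-", "start-", "stop-",
   "test-", "invoke-", "import-", "export-", "select-",
   "where-", "foreach-", "measure-", "sort-", "group-"]

def detect_console_type (command : String) : String :=
  let c := PySem.Str.lower (PySem.Str.strip command)
  if psIndicators.any (fun ind => PySem.Str.startswith c ind) then "powershell"
  else if PySem.Str.isIn "-" c && !(PySem.Str.startswith c "cd ") then "powershell"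
  else "cmd"

-- ===== PORT B =====
def detect_console_type_alt (command : String) : String :=
  let c := PySem.Str.lower (PySem.Str.strip command)
  if PySem.Str.isIn "-" c && !(PySem.Str.startswith c "cd ") then "powershell" else "cmd"

-- ===== PRECONDITION & SPEC =====
def Spec_detect_console_type (command : String) (out : String) : Prop := out = detect_console_type_alt command
instance (command : String) (out : String) : Decidable (Spec_detect_console_type command out) := by unfold Spec_detect_console_type; infer_instance

-- ===== CLAIM (what is proved, stated in full; the proofs are below) =====
def Claim_equal_detect_console_type : Prop := ∀ (command : String), Dom_detect_console_type command → Spec_detect_console_type command (detect_console_type command)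

-- ===== LEMMAS AND PROOFS =====

-- every indicator: contains '-', and is prefix-incomparable with "cd "
lemma psIndicators_facts : ∀ ind ∈ psIndicators,
    '-' ∈ ind.toList ∧ ¬ ("cd ".toList <+: ind.toList) ∧ ¬ (ind.toList <+: "cd ".toList) := by
  decide

-- if some indicator prefixes c, then the dash test fires and the "cd " test does not
lemma indicator_subsumed (ind : String) (hmem : ind ∈ psIndicators)
    (c : List Char) (hsw : ind.toList <+: c) :
    PySem.Chars.isIn "-".toList c = true ∧ PySem.Chars.startswith c "cd ".toList = false := by
  obtain ⟨hdash, hncd, hncd'⟩ := psIndicators_facts ind hmem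
  constructor
  · rw [PySem.Chars.isIn_iff_infix]
    have : ['-'] <:+: ind.toList := by
      obtain ⟨s, t, hst⟩ := List.append_of_mem hdash
      exact ⟨s, t, by simp [hst]⟩
    exact this.trans hsw.isInfix
  · by_contra h
    have hcd : "cd ".toList <+: c :=
      (PySem.Chars.startswith_iff _ _).mp (by simpa using h)
    rcases List.prefix_or_prefix_of_prefix hsw hcd with h1 | h2
    · exact hncd' h1
    · exact hncd h2

theorem detect_console_type_spec : Claim_equal_detect_console_type := by
  intro command _
  unfold Spec_detect_console_type detect_console_type detect_console_type_alt
  simp only []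
  set c := PySem.Str.lower (PySem.Str.strip command) with hc
  have key : ∀ x ∈ psIndicators, PySem.Chars.startswith c.toList x.toList = true →
      PySem.Chars.isIn ['-'] c.toList = true ∧
      PySem.Chars.startswith c.toList ['c', 'd', ' '] = false := by
    intro x hx hsx
    have h := indicator_subsumed x hx c.toList ((PySem.Chars.startswith_iff _ _).mp hsx)
    simpa using h
  simp
  exact key
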